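-- pv_equiv track=rewrite | github.com/samiksha014/Python_Lab | python_practical3/pattern_1.py | pattern_printing
-- ===== SOURCE A (Python) =====
-- def pattern_printing(length):
--     if length<1:
--         return "enter the number greater than equal to 1"
--
--     else:
--         #empty string to store the pattern
--         pattern=[]
--
--         #iteration of each row
--         for i in range(length * 3):
--             line=[]
--
--             #iteration of each column according to print the specified pattern
--             for j in range ( length * 2 + 3 ):
--                 if i == length and j == length+1:
--                     line.append(str(length))
--
--                 elif i <= length and j <= length + 1:
--                     if i + j == length+1:
--                         line.append("*")
--                     else:
--                         line.append(" ")
--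
--                 elif i>length and j<=length+1 and i<=length*2-1:
--                     if i-j == length-1:
--                         line.append("*")
--                     else:
--                         line.append(" ")
--
--                 elif i<= length and j>length+1:
--                     if j-i == length+1:
--                         line.append("*")
--                     else:
--                         line.append(" ")
--
--                 elif i>length and j>length+1 and i<=length*2-1:
--                     if i+j == length*3+1:
--                         line.append("*")
--                     else:
--                         line.append(" ")
--
--                 elif i>length*2-1:
--                     line.append("*")
--             pattern.append("".join(line))
--
--         return "\n".join(pattern)
-- ===== SOURCE B (Python) =====
-- def pattern_printing(length):
--     if length < 1:
--         return "enter the number greater than equal to 1"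
--     width = length * 2 + 3
--     rows = []
--     # top block: a hollow V opening downward, stars at length+1-i and length+1+i
--     for i in range(length + 1):
--         row = [" "] * width
--         row[length + 1 - i] = "*"
--         row[length + 1 + i] = "*"
--         if i == length:
--             row[length + 1] = str(length)
--         rows.append("".join(row))
--     # lower wedge: stars converging back toward the centre column
--     for i in range(length + 1, length * 2):
--         row = [" "] * width
--         row[i - length + 1] = "*"
--         row[length * 3 + 1 - i] = "*"
--         rows.append("".join(row))
--     # solid base
--     rows.extend(["*" * width] * length)
--     return "\n".join(rows)
-- ===== Notes on version B (the rewrite author's own statement) =====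
-- stated objective: simpler
-- what changed: B builds each row once from closed-form star positions (a blank row plus two point writes, and a solid base row) instead of A's per-cell six-branch scan over every (row, column) pair.
import Mathlib
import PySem

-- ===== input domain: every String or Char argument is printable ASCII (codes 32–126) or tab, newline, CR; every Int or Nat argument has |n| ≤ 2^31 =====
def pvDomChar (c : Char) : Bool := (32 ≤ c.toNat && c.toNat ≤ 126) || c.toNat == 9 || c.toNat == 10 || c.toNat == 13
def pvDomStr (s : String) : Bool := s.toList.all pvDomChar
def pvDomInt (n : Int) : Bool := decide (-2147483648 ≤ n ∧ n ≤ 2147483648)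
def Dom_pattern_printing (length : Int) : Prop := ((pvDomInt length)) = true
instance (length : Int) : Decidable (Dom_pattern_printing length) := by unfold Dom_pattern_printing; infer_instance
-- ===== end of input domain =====

-- B builds each row from closed-form star positions (blank row + two point writes)
-- instead of A's per-column branch scan; objective: simpler. Same return value for every int.


-- ===== PORT A =====
def pattern_printing (length : Int) : String :=
  if length < 1 then "enter the number greater than equal to 1"
  else
    let pattern : List String :=
      (PySem.List.pyRange 0 (length * 3) 1).foldl (fun pattern i =>
        -- line.append(x): the append loop is built back-to-front (cons, O(1) per append)
        -- and reversed once at the end — same elements, same order as Python's list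
        let line : List String :=
          ((PySem.List.pyRange 0 (length * 2 + 3) 1).foldl (fun line j =>
            if i = length ∧ j = length + 1 then PySem.Int.toStr length :: line
            else if i ≤ length ∧ j ≤ length + 1 then
              (if i + j = length + 1 then "*" :: line else " " :: line)
            else if i > length ∧ j ≤ length + 1 ∧ i ≤ length * 2 - 1 then
              (if i - j = length - 1 then "*" :: line else " " :: line)
            else if i ≤ length ∧ j > length + 1 then
              (if j - i = length + 1 then "*" :: line else " " :: line)
            else if i > length ∧ j > length + 1 ∧ i ≤ length * 2 - 1 then
              (if i + j = length * 3 + 1 then "*" :: line else " " :: line)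
            else if i > length * 2 - 1 then "*" :: line
            else line) []).reverse
        pattern ++ [PySem.Str.join "" line]) []
    PySem.Str.join "\n" pattern

-- ===== PORT B =====
def pattern_printing_alt (length : Int) : String :=
  if length < 1 then "enter the number greater than equal to 1"
  else
    let width := length * 2 + 3
    -- top block: a hollow V opening downward, stars at length+1-i and length+1+i
    let rows : List String :=
      (PySem.List.pyRange 0 (length + 1) 1).foldl (fun rows i =>
        let row := List.replicate width.toNat " "      -- [" "] * width
        let row := PySem.List.pySetD row (length + 1 - i) "*"
        let row := PySem.List.pySetD row (length + 1 + i) "*"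
        let row := if i = length then PySem.List.pySetD row (length + 1) (PySem.Int.toStr length) else row
        rows ++ [PySem.Str.join "" row]) []
    -- lower wedge: stars converging back toward the centre column
    let rows : List String :=
      (PySem.List.pyRange (length + 1) (length * 2) 1).foldl (fun rows i =>
        let row := List.replicate width.toNat " "
        let row := PySem.List.pySetD row (i - length + 1) "*"
        let row := PySem.List.pySetD row (length * 3 + 1 - i) "*"
        rows ++ [PySem.Str.join "" row]) rows
    -- solid base: "*" * width repeated length times ("*"*width ported as the join of width copies, exact)
    let rows := rows ++ List.replicate length.toNat (PySem.Str.join "" (List.replicate width.toNat "*"))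
    PySem.Str.join "\n" rows

-- ===== PRECONDITION & SPEC =====
def Spec_pattern_printing (length : Int) (out : String) : Prop := out = pattern_printing_alt length
instance (length : Int) (out : String) : Decidable (Spec_pattern_printing length out) := by unfold Spec_pattern_printing; infer_instance

-- ===== CLAIM (what is proved, stated in full; the proofs are below) =====
def Claim_equal_pattern_printing : Prop := ∀ (length : Int), Dom_pattern_printing length → Spec_pattern_printing length (pattern_printing length)

-- ===== LEMMAS AND PROOFS =====

-- the single cell A's inner loop appends at column j of row i
def pvCellA (L i j : Int) : String :=
  if i = L ∧ j = L + 1 then PySem.Int.toStr L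
  else if i ≤ L ∧ j ≤ L + 1 then (if i + j = L + 1 then "*" else " ")
  else if i > L ∧ j ≤ L + 1 ∧ i ≤ L * 2 - 1 then (if i - j = L - 1 then "*" else " ")
  else if i ≤ L ∧ j > L + 1 then (if j - i = L + 1 then "*" else " ")
  else if i > L ∧ j > L + 1 ∧ i ≤ L * 2 - 1 then (if i + j = L * 3 + 1 then "*" else " ")
  else "*"

-- A's inner-loop body always appends exactly one cell (the branch chain is exhaustive)
lemma pvBodyA_eq (L i j : Int) (line : List String) :
    (if i = L ∧ j = L + 1 then PySem.Int.toStr L :: line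
     else if i ≤ L ∧ j ≤ L + 1 then
       (if i + j = L + 1 then "*" :: line else " " :: line)
     else if i > L ∧ j ≤ L + 1 ∧ i ≤ L * 2 - 1 then
       (if i - j = L - 1 then "*" :: line else " " :: line)
     else if i ≤ L ∧ j > L + 1 then
       (if j - i = L + 1 then "*" :: line else " " :: line)
     else if i > L ∧ j > L + 1 ∧ i ≤ L * 2 - 1 then
       (if i + j = L * 3 + 1 then "*" :: line else " " :: line)
     else if i > L * 2 - 1 then "*" :: line
     else line) = pvCellA L i j :: line := by
  unfold pvCellA; split_ifs <;> first | rfl | omega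

-- a cons-accumulated loop is the reversed map
lemma pvFoldlCons {α β : Type} (f : α → β) (l : List α) (acc : List β) :
    l.foldl (fun acc x => f x :: acc) acc = (l.map f).reverse ++ acc := by
  induction l generalizing acc with
  | nil => rfl
  | cons a t ih => simp [ih]

-- A's row i, as a map over the columns
lemma pvLineA_eq (L i : Int) :
    ((PySem.List.pyRange 0 (L * 2 + 3) 1).foldl (fun line j =>
      if i = L ∧ j = L + 1 then PySem.Int.toStr L :: line
      else if i ≤ L ∧ j ≤ L + 1 then
        (if i + j = L + 1 then "*" :: line else " " :: line)
      else if i > L ∧ j ≤ L + 1 ∧ i ≤ L * 2 - 1 then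
        (if i - j = L - 1 then "*" :: line else " " :: line)
      else if i ≤ L ∧ j > L + 1 then
        (if j - i = L + 1 then "*" :: line else " " :: line)
      else if i > L ∧ j > L + 1 ∧ i ≤ L * 2 - 1 then
        (if i + j = L * 3 + 1 then "*" :: line else " " :: line)
      else if i > L * 2 - 1 then "*" :: line
      else line) []).reverse = (PySem.List.pyRange 0 (L * 2 + 3) 1).map (pvCellA L i) := by
  have h : (fun (line : List String) (j : Int) =>
      if i = L ∧ j = L + 1 then PySem.Int.toStr L :: line
      else if i ≤ L ∧ j ≤ L + 1 then
        (if i + j = L + 1 then "*" :: line else " " :: line)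
      else if i > L ∧ j ≤ L + 1 ∧ i ≤ L * 2 - 1 then
        (if i - j = L - 1 then "*" :: line else " " :: line)
      else if i ≤ L ∧ j > L + 1 then
        (if j - i = L + 1 then "*" :: line else " " :: line)
      else if i > L ∧ j > L + 1 ∧ i ≤ L * 2 - 1 then
        (if i + j = L * 3 + 1 then "*" :: line else " " :: line)
      else if i > L * 2 - 1 then "*" :: line
      else line) = (fun line j => pvCellA L i j :: line) := by
    funext line j; exact pvBodyA_eq L i j line
  rw [h, pvFoldlCons]
  simp

-- top block row (0 <= i <= L): A's column scan equals B's two/three point writes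
lemma pvRowTop (L i : Int) (hL : 1 ≤ L) (h0 : 0 ≤ i) (hi : i ≤ L) :
    (PySem.List.pyRange 0 (L * 2 + 3) 1).map (pvCellA L i) =
      (if i = L then
        (((List.replicate (L * 2 + 3).toNat " ").set (L + 1 - i).toNat "*").set
          (L + 1 + i).toNat "*").set (L + 1).toNat (PySem.Int.toStr L)
      else
        ((List.replicate (L * 2 + 3).toNat " ").set (L + 1 - i).toNat "*").set
          (L + 1 + i).toNat "*") := by
  rw [PySem.List.pyRange_one]
  by_cases hiL : i = L
  · rw [if_pos hiL]
    apply List.ext_getElem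
    · simp only [List.length_map, List.length_range, List.length_set, List.length_replicate]
      omega
    · intro k h1 h2
      simp only [List.length_map, List.length_range] at h1
      simp only [List.getElem_map, List.getElem_range, List.getElem_set, List.getElem_replicate]
      unfold pvCellA
      split_ifs <;> first | rfl | omega
  · rw [if_neg hiL]
    apply List.ext_getElem
    · simp only [List.length_map, List.length_range, List.length_set, List.length_replicate]
      omega
    · intro k h1 h2
      simp only [List.length_map, List.length_range] at h1
      simp only [List.getElem_map, List.getElem_range, List.getElem_set, List.getElem_replicate]
      unfold pvCellA
      split_ifs <;> first | rfl | omega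

-- lower wedge row (L < i < 2L)
lemma pvRowMid (L i : Int) (hL : 1 ≤ L) (h0 : L + 1 ≤ i) (hi : i < L * 2) :
    (PySem.List.pyRange 0 (L * 2 + 3) 1).map (pvCellA L i) =
      ((List.replicate (L * 2 + 3).toNat " ").set (i - L + 1).toNat "*").set
        (L * 3 + 1 - i).toNat "*" := by
  rw [PySem.List.pyRange_one]
  apply List.ext_getElem
  · simp only [List.length_map, List.length_range, List.length_set, List.length_replicate]
    omega
  · intro k h1 h2
    simp only [List.length_map, List.length_range] at h1
    simp only [List.getElem_map, List.getElem_range, List.getElem_set, List.getElem_replicate]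
    unfold pvCellA
    split_ifs <;> first | rfl | omega

-- solid base row (2L <= i)
lemma pvRowBase (L i : Int) (hL : 1 ≤ L) (hi : L * 2 ≤ i) :
    (PySem.List.pyRange 0 (L * 2 + 3) 1).map (pvCellA L i) =
      List.replicate (L * 2 + 3).toNat "*" := by
  rw [PySem.List.pyRange_one]
  apply List.ext_getElem
  · simp only [List.length_map, List.length_range, List.length_replicate]
    omega
  · intro k h1 h2
    simp only [List.length_map, List.length_range] at h1
    simp only [List.getElem_map, List.getElem_range, List.getElem_replicate]
    unfold pvCellA
    split_ifs <;> first | rfl | omega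

-- ===== VERDICT (by name: the statement is the Claim_ definition above) =====
theorem pattern_printing_spec : Claim_equal_pattern_printing := by
  unfold Claim_equal_pattern_printing Spec_pattern_printing
  intro L _
  unfold pattern_printing pattern_printing_alt
  by_cases hneg : L < 1
  · rw [if_pos hneg, if_pos hneg]
  · rw [if_neg hneg, if_neg hneg]
    have hL : 1 ≤ L := by omega
    simp only []
    -- turn every append-one-element loop into a map
    congr 1
    calc (PySem.List.pyRange 0 (L * 3) 1).foldl _ []
        = (PySem.List.pyRange 0 (L * 3) 1).map (fun i =>
            PySem.Str.join "" ((PySem.List.pyRange 0 (L * 2 + 3) 1).map (pvCellA L i))) := by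
          rw [PySem.List.foldl_append_singleton_eq_map]
          simp only [List.nil_append]
          exact List.map_congr_left (fun i _ => by rw [pvLineA_eq])
      _ = _ := by
          rw [PySem.List.pyRange_one_append 0 (L + 1) (L * 3) (by omega) (by omega),
              PySem.List.pyRange_one_append (L + 1) (L * 2) (L * 3) (by omega) (by omega),
              List.map_append, List.map_append]
          rw [PySem.List.foldl_append_singleton_eq_map, PySem.List.foldl_append_singleton_eq_map]
          simp only [List.nil_append, List.append_assoc]
          congr 1
          · -- top block
            apply List.map_congr_left
            intro i hi
            rw [PySem.List.mem_pyRange_one] at hi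
            rw [pvRowTop L i hL hi.1 (by omega)]
            by_cases hiL : i = L
            · rw [if_pos hiL, if_pos hiL,
                  PySem.List.pySetD_of_nonneg _ "*" (show (0:Int) ≤ L + 1 - i by omega),
                  PySem.List.pySetD_of_nonneg _ "*" (show (0:Int) ≤ L + 1 + i by omega),
                  PySem.List.pySetD_of_nonneg _ (PySem.Int.toStr L) (show (0:Int) ≤ L + 1 by omega)]
            · rw [if_neg hiL, if_neg hiL,
                  PySem.List.pySetD_of_nonneg _ "*" (show (0:Int) ≤ L + 1 - i by omega),
                  PySem.List.pySetD_of_nonneg _ "*" (show (0:Int) ≤ L + 1 + i by omega)]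
          congr 1
          · -- lower wedge
            apply List.map_congr_left
            intro i hi
            rw [PySem.List.mem_pyRange_one] at hi
            rw [pvRowMid L i hL hi.1 hi.2,
                PySem.List.pySetD_of_nonneg _ "*" (show (0:Int) ≤ i - L + 1 by omega),
                PySem.List.pySetD_of_nonneg _ "*" (show (0:Int) ≤ L * 3 + 1 - i by omega)]
          · -- solid base
            rw [List.eq_replicate_iff]
            refine ⟨by simp [PySem.List.length_pyRange_one]; omega, ?_⟩
            intro b hb
            rw [List.mem_map] at hb
            obtain ⟨i, hi, rfl⟩ := hb
            rw [PySem.List.mem_pyRange_one] at hi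
            rw [pvRowBase L i hL hi.1]
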